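-- pv_equiv track=rewrite | github.com/serkantuncer/FinansTakip | !!!/ikinci_version_OLD/attached_assets/app.py | fon_ara
-- ===== SOURCE A (Python) =====
-- def fon_ara(terim):
--     """Fon arama API'si"""
--     terim = terim.upper()
--
--     # 1. TEFAS'tan fon verileri çekilir (isimleriyle birlikte)
--     # Bu örnek için sadece yaygın fonları içeren bir listeyi döndürüyoruz
--     # Gerçek uygulamada buraya TEFAS'tan veri çekme API'si eklenebilir
--
--     yaygın_fonlar = [
--         {"kod": "TLI", "isim": "Ak Portföy Para Piyasası Fonu", "tur": "fon"},
--         {"kod": "TI2", "isim": "İş Portföy Para Piyasası Fonu", "tur": "fon"},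
--         {"kod": "AFA", "isim": "Ak Portföy Amerika Yabancı Hisse Senedi Fonu", "tur": "fon"},
--         {"kod": "TTE", "isim": "İş Portföy BIST Teknoloji Ağırlıklı Sınırlamalı Endeks Hisse Senedi Fonu", "tur": "fon"},
--         {"kod": "IYF", "isim": "İş Portföy Yıldızlar Serbest Fon", "tur": "fon"},
--         {"kod": "TYA", "isim": "HSBC Portföy Para Piyasası Fonu", "tur": "fon"},
--         {"kod": "HVS", "isim": "HSBC Portföy Hisse Senedi Fonu", "tur": "fon"},
--         {"kod": "YFT", "isim": "Yapı Kredi Portföy BİST 30 Endeksi Hisse Senedi Fonu", "tur": "fon"},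
--         {"kod": "TZA", "isim": "Ziraat Portföy Para Piyasası Fonu", "tur": "fon"},
--         {"kod": "ZBJ", "isim": "Ziraat Portföy Para Piyasası Fonu", "tur": "fon"},
--         {"kod": "ZPE", "isim": "Ziraat Portföy BIST 30 Endeksi Hisse Senedi Fonu", "tur": "fon"},
--         {"kod": "GMR", "isim": "Garanti Portföy Birinci Para Piyasası Fonu", "tur": "fon"},
--         {"kod": "GUD", "isim": "Garanti Portföy Değişken Fon", "tur": "fon"},
--         {"kod": "DZE", "isim": "Deniz Portföy BIST 100 Endeksi Hisse Senedi Fonu", "tur": "fon"},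
--         {"kod": "OMF", "isim": "Osmanlı Portföy Para Piyasası Fonu", "tur": "fon"},
--         {"kod": "VEF", "isim": "Vakıf Emeklilik Para Piyasası Fonu", "tur": "fon"}
--     ]
--
--     sonuclar = []
--
--     # Koddaki eşleşme (tam eşleşmeyi en önde göster)
--     for fon in yaygın_fonlar:
--         if fon["kod"] == terim:
--             sonuclar.append(fon)
--             break
--
--     # Koddaki eşleşme (kısmi)
--     for fon in yaygın_fonlar:
--         if terim in fon["kod"] and fon not in sonuclar:
--             sonuclar.append(fon)
--
--     # İsimdeki eşleşme
--     for fon in yaygın_fonlar: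
--         if terim in fon["isim"].upper() and fon not in sonuclar:
--             sonuclar.append(fon)
--
--     return sonuclar
-- ===== SOURCE B (Python) =====
-- def fon_ara(terim):
--     """Fon arama API'si — single pass: classify each fund into exact / partial-code / name buckets."""
--     terim = terim.upper()
--
--     yaygın_fonlar = [
--         {"kod": "TLI", "isim": "Ak Portföy Para Piyasası Fonu", "tur": "fon"},
--         {"kod": "TI2", "isim": "İş Portföy Para Piyasası Fonu", "tur": "fon"},
--         {"kod": "AFA", "isim": "Ak Portföy Amerika Yabancı Hisse Senedi Fonu", "tur": "fon"},
--         {"kod": "TTE", "isim": "İş Portföy BIST Teknoloji Ağırlıklı Sınırlamalı Endeks Hisse Senedi Fonu", "tur": "fon"},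
--         {"kod": "IYF", "isim": "İş Portföy Yıldızlar Serbest Fon", "tur": "fon"},
--         {"kod": "TYA", "isim": "HSBC Portföy Para Piyasası Fonu", "tur": "fon"},
--         {"kod": "HVS", "isim": "HSBC Portföy Hisse Senedi Fonu", "tur": "fon"},
--         {"kod": "YFT", "isim": "Yapı Kredi Portföy BİST 30 Endeksi Hisse Senedi Fonu", "tur": "fon"},
--         {"kod": "TZA", "isim": "Ziraat Portföy Para Piyasası Fonu", "tur": "fon"},
--         {"kod": "ZBJ", "isim": "Ziraat Portföy Para Piyasası Fonu", "tur": "fon"},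
--         {"kod": "ZPE", "isim": "Ziraat Portföy BIST 30 Endeksi Hisse Senedi Fonu", "tur": "fon"},
--         {"kod": "GMR", "isim": "Garanti Portföy Birinci Para Piyasası Fonu", "tur": "fon"},
--         {"kod": "GUD", "isim": "Garanti Portföy Değişken Fon", "tur": "fon"},
--         {"kod": "DZE", "isim": "Deniz Portföy BIST 100 Endeksi Hisse Senedi Fonu", "tur": "fon"},
--         {"kod": "OMF", "isim": "Osmanlı Portföy Para Piyasası Fonu", "tur": "fon"},
--         {"kod": "VEF", "isim": "Vakıf Emeklilik Para Piyasası Fonu", "tur": "fon"}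
--     ]
--
--     tam, kismi, isimden = [], [], []
--     for fon in yaygın_fonlar:
--         if fon["kod"] == terim:
--             tam.append(fon)
--         elif terim in fon["kod"]:
--             kismi.append(fon)
--         elif terim in fon["isim"].upper():
--             isimden.append(fon)
--     return tam + kismi + isimden
-- ===== Notes on version B (the rewrite author's own statement) =====
-- stated objective: simpler
-- what changed: A runs three separate passes over the fund list, the last two re-scanning the growing result list to skip duplicates; B makes a single pass that classifies each fund with an if/elif chain into exact-code / partial-code / name buckets and returns their concatenation, with no membership re-scans.
import Mathlib
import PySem

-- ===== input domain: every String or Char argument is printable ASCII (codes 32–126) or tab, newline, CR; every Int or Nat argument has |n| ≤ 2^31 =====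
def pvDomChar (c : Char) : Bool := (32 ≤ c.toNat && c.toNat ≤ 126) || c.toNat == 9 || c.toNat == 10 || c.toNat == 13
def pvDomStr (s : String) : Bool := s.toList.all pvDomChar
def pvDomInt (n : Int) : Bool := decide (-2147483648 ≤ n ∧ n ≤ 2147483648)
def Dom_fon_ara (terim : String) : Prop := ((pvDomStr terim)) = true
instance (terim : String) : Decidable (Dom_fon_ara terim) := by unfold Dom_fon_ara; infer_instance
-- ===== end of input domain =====

-- B replaces A's three dedup-scanning passes over the fund list by a single classifying pass
-- into three buckets (exact code / partial code / name match), concatenated; objective: simpler.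


-- ===== PORT A =====
-- shared data/helpers (the very same literal fund list and dict/str operations appear in both Pythons)

-- Python str.upper, ported by hand: PySem.Str.upper is ASCII-only, but the literal fund names
-- contain the Turkish lowercase letters ı ş ö ğ, which CPython's str.upper maps as below
-- (exact for ASCII and for every character occurring in this file's data; terim is ASCII by Dom).
def pyUpperChar (c : Char) : Char :=
  if c = 'ı' then 'I'
  else if c = 'ş' then 'Ş'
  else if c = 'ö' then 'Ö'
  else if c = 'ğ' then 'Ğ'
  else PySem.Chars.upperChar c

def pyUpper (s : String) : String := String.ofList (s.toList.map pyUpperChar)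

-- fon[k]: every literal dict below has the key, so the "" default is never reached
def dget (f : List (String × String)) (k : String) : String :=
  ((PySem.Dict.mk f).get? k).getD ""

def pvFund (k i : String) : List (String × String) := [("kod", k), ("isim", i), ("tur", "fon")]

def yayginFonlar : List (List (String × String)) := [
  pvFund "TLI" "Ak Portföy Para Piyasası Fonu",
  pvFund "TI2" "İş Portföy Para Piyasası Fonu",
  pvFund "AFA" "Ak Portföy Amerika Yabancı Hisse Senedi Fonu",
  pvFund "TTE" "İş Portföy BIST Teknoloji Ağırlıklı Sınırlamalı Endeks Hisse Senedi Fonu",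
  pvFund "IYF" "İş Portföy Yıldızlar Serbest Fon",
  pvFund "TYA" "HSBC Portföy Para Piyasası Fonu",
  pvFund "HVS" "HSBC Portföy Hisse Senedi Fonu",
  pvFund "YFT" "Yapı Kredi Portföy BİST 30 Endeksi Hisse Senedi Fonu",
  pvFund "TZA" "Ziraat Portföy Para Piyasası Fonu",
  pvFund "ZBJ" "Ziraat Portföy Para Piyasası Fonu",
  pvFund "ZPE" "Ziraat Portföy BIST 30 Endeksi Hisse Senedi Fonu",
  pvFund "GMR" "Garanti Portföy Birinci Para Piyasası Fonu",
  pvFund "GUD" "Garanti Portföy Değişken Fon",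
  pvFund "DZE" "Deniz Portföy BIST 100 Endeksi Hisse Senedi Fonu",
  pvFund "OMF" "Osmanlı Portföy Para Piyasası Fonu",
  pvFund "VEF" "Vakıf Emeklilik Para Piyasası Fonu"]

-- A, loop 1: 'for fon …: if fon["kod"] == terim: append; break'
def fonAraTam (t : String) : List (List (String × String)) → List (List (String × String))
  | [] => []
  | f :: rest => if dget f "kod" == t then [f] else fonAraTam t rest

-- A, loops 2 and 3 share this shape: 'for fon …: if p(fon) and fon not in sonuclar: sonuclar.append(fon)'
def fonAraEkle (p : List (String × String) → Bool)
    (sonuclar : List (List (String × String))) :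
    List (List (String × String)) → List (List (String × String))
  | [] => sonuclar
  | f :: rest =>
      fonAraEkle p (if p f && !(sonuclar.contains f) then sonuclar ++ [f] else sonuclar) rest

def fon_ara (terim : String) : List (List (String × String)) :=
  fonAraEkle (fun f => PySem.Str.isIn (pyUpper terim) (pyUpper (dget f "isim")))
    (fonAraEkle (fun f => PySem.Str.isIn (pyUpper terim) (dget f "kod"))
      (fonAraTam (pyUpper terim) yayginFonlar) yayginFonlar)
    yayginFonlar

-- ===== PORT B =====
-- one pass, if/elif/elif classification into three buckets
def fonSinifla (t : String)
    (st : List (List (String × String)) × List (List (String × String)) × List (List (String × String)))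
    (f : List (String × String)) :
    List (List (String × String)) × List (List (String × String)) × List (List (String × String)) :=
  if dget f "kod" == t then (st.1 ++ [f], st.2.1, st.2.2)
  else if PySem.Str.isIn t (dget f "kod") then (st.1, st.2.1 ++ [f], st.2.2)
  else if PySem.Str.isIn t (pyUpper (dget f "isim")) then (st.1, st.2.1, st.2.2 ++ [f])
  else st

def fon_ara_alt (terim : String) : List (List (String × String)) :=
  (yayginFonlar.foldl (fonSinifla (pyUpper terim)) ([], [], [])).1 ++
  (yayginFonlar.foldl (fonSinifla (pyUpper terim)) ([], [], [])).2.1 ++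
  (yayginFonlar.foldl (fonSinifla (pyUpper terim)) ([], [], [])).2.2

-- ===== PRECONDITION & SPEC =====
def Spec_fon_ara (terim : String) (out : List (List (String × String))) : Prop := out = fon_ara_alt terim
instance (terim : String) (out : List (List (String × String))) : Decidable (Spec_fon_ara terim out) := by unfold Spec_fon_ara; infer_instance

-- ===== CLAIM (what is proved, stated in full; the proofs are below) =====
def Claim_equal_fon_ara : Prop := ∀ (terim : String), Dom_fon_ara terim → Spec_fon_ara terim (fon_ara terim)

-- ===== LEMMAS AND PROOFS =====

-- the fund codes in the literal list are pairwise distinct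
lemma kods_nodup : (yayginFonlar.map (fun f => dget f "kod")).Nodup := by
  have h : yayginFonlar.map (fun f => dget f "kod") =
      ["TLI", "TI2", "AFA", "TTE", "IYF", "TYA", "HVS", "YFT",
       "TZA", "ZBJ", "ZPE", "GMR", "GUD", "DZE", "OMF", "VEF"] := by rfl
  rw [h]
  decide

lemma fonlar_nodup : yayginFonlar.Nodup := kods_nodup.of_map

-- an exact code match is also a substring match: kod == t → t in kod
lemma pk_imp_qk (t : String) (f : List (String × String)) :
    (dget f "kod" == t) = true → PySem.Str.isIn t (dget f "kod") = true := by
  intro h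
  have ht : dget f "kod" = t := by exact_mod_cast beq_iff_eq.mp h
  rw [ht, PySem.Str.isIn_iff_infix]

-- A's break-loop returns the filter, when codes are unique
lemma fonAraTam_eq (t : String) :
    ∀ (L : List (List (String × String))),
      (L.map (fun f => dget f "kod")).Nodup →
      fonAraTam t L = L.filter (fun f => dget f "kod" == t) := by
  intro L
  induction L with
  | nil => intro _; rfl
  | cons f rest ih =>
    intro hnd
    simp only [List.map_cons, List.nodup_cons] at hnd
    by_cases hf : (dget f "kod" == t) = true
    · have hrest : rest.filter (fun f => dget f "kod" == t) = [] := by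
        rw [List.filter_eq_nil_iff]
        intro g hg hgt
        apply hnd.1
        have h1 : dget g "kod" = t := beq_iff_eq.mp hgt
        have h2 : dget f "kod" = t := beq_iff_eq.mp hf
        rw [h2, ← h1]
        exact List.mem_map_of_mem hg
      simp [fonAraTam, hf, List.filter_cons, hrest]
    · simp [fonAraTam, hf, List.filter_cons, ih hnd.2]

-- A's dedup-append loop over a duplicate-free list is 'append the new matches'
lemma fonAraEkle_eq (p : List (String × String) → Bool) :
    ∀ (L : List (List (String × String))), L.Nodup →
      ∀ (s : List (List (String × String))),
        fonAraEkle p s L = s ++ L.filter (fun f => p f && !(s.contains f)) := by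
  intro L
  induction L with
  | nil => intro _ s; simp [fonAraEkle]
  | cons f rest ih =>
    intro hnd s
    simp only [List.nodup_cons] at hnd
    by_cases hc : (p f && !(s.contains f)) = true
    · rw [show fonAraEkle p s (f :: rest) =
          fonAraEkle p (if p f && !(s.contains f) then s ++ [f] else s) rest from rfl,
        if_pos hc, ih hnd.2 (s ++ [f])]
      have hcong : rest.filter (fun g => p g && !((s ++ [f]).contains g)) =
          rest.filter (fun g => p g && !(s.contains g)) := by
        apply List.filter_congr
        intro g hg
        have hne : ¬ (g = f) := fun h => hnd.1 (h ▸ hg)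
        simp [List.contains_append, List.contains_cons, hne]
      rw [hcong, List.filter_cons, hc]
      simp
    · rw [show fonAraEkle p s (f :: rest) =
          fonAraEkle p (if p f && !(s.contains f) then s ++ [f] else s) rest from rfl,
        if_neg hc, ih hnd.2 s, List.filter_cons]
      have hfq : (p f && !s.contains f) = false := by
        cases h : (p f && !s.contains f) with
        | false => rfl
        | true => exact absurd h hc
      simp only [hfq]
      simp

-- membership in a filter of a duplicate-free list, as a Bool
lemma contains_filter (q : List (String × String) → Bool)
    (L : List (List (String × String))) (f : List (String × String)) (hf : f ∈ L) :
    (L.filter q).contains f = q f := by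
  by_cases hq : q f = true
  · simp [List.mem_filter, hf, hq]
  · simp [List.mem_filter, hq]

-- the whole of A (its three loops composed), as three disjoint filters
lemma fon_ara_filters (t : String) :
    fonAraEkle (fun f => PySem.Str.isIn t (pyUpper (dget f "isim")))
      (fonAraEkle (fun f => PySem.Str.isIn t (dget f "kod")) (fonAraTam t yayginFonlar) yayginFonlar)
      yayginFonlar =
      yayginFonlar.filter (fun f => dget f "kod" == t) ++
      yayginFonlar.filter (fun f => !(dget f "kod" == t) && PySem.Str.isIn t (dget f "kod")) ++
      yayginFonlar.filter (fun f => !(dget f "kod" == t) && !(PySem.Str.isIn t (dget f "kod")) &&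
        PySem.Str.isIn t (pyUpper (dget f "isim"))) := by
  have h1 : fonAraTam t yayginFonlar = yayginFonlar.filter (fun f => dget f "kod" == t) :=
    fonAraTam_eq t yayginFonlar kods_nodup
  have h2 : fonAraEkle (fun f => PySem.Str.isIn t (dget f "kod")) (fonAraTam t yayginFonlar) yayginFonlar =
      yayginFonlar.filter (fun f => dget f "kod" == t) ++
      yayginFonlar.filter (fun f => !(dget f "kod" == t) && PySem.Str.isIn t (dget f "kod")) := by
    rw [h1, fonAraEkle_eq _ yayginFonlar fonlar_nodup]
    have hcong : yayginFonlar.filter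
        (fun f => PySem.Str.isIn t (dget f "kod") &&
          !((yayginFonlar.filter (fun f => dget f "kod" == t)).contains f)) =
        yayginFonlar.filter (fun f => !(dget f "kod" == t) && PySem.Str.isIn t (dget f "kod")) := by
      apply List.filter_congr
      intro f hf
      rw [contains_filter _ yayginFonlar f hf]
      cases hpk : (dget f "kod" == t) <;> simp
    rw [hcong]
  rw [h2, fonAraEkle_eq _ yayginFonlar fonlar_nodup, List.append_assoc, List.append_assoc]
  have hcong : yayginFonlar.filter
      (fun f => PySem.Str.isIn t (pyUpper (dget f "isim")) &&
        !((yayginFonlar.filter (fun f => dget f "kod" == t) ++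
           yayginFonlar.filter (fun f => !(dget f "kod" == t) && PySem.Str.isIn t (dget f "kod"))).contains f)) =
      yayginFonlar.filter (fun f => !(dget f "kod" == t) && !(PySem.Str.isIn t (dget f "kod")) &&
        PySem.Str.isIn t (pyUpper (dget f "isim"))) := by
    apply List.filter_congr
    intro f hf
    have hc : ((yayginFonlar.filter (fun f => dget f "kod" == t) ++
        yayginFonlar.filter (fun f => !(dget f "kod" == t) && PySem.Str.isIn t (dget f "kod"))).contains f)
        = ((dget f "kod" == t) || (!(dget f "kod" == t) && PySem.Str.isIn t (dget f "kod"))) := by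
      simp only [List.contains_append, contains_filter _ yayginFonlar f hf]
    rw [hc]
    cases hpk : (dget f "kod" == t)
    · cases hqk : PySem.Str.isIn t (dget f "kod") <;> simp
    · have := pk_imp_qk t f hpk
      simp [this]
  rw [hcong]

-- B's fold fills the three buckets with the three filters
lemma foldB (t : String) :
    ∀ (L : List (List (String × String))) (a b c : List (List (String × String))),
      L.foldl (fonSinifla t) (a, b, c) =
        (a ++ L.filter (fun f => dget f "kod" == t),
         b ++ L.filter (fun f => !(dget f "kod" == t) && PySem.Str.isIn t (dget f "kod")),
         c ++ L.filter (fun f => !(dget f "kod" == t) && !(PySem.Str.isIn t (dget f "kod")) &&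
           PySem.Str.isIn t (pyUpper (dget f "isim")))) := by
  intro L
  induction L with
  | nil => intro a b c; simp
  | cons f rest ih =>
    intro a b c
    rw [List.foldl_cons]
    cases h1 : (dget f "kod" == t) with
    | true =>
      rw [show fonSinifla t (a, b, c) f = (a ++ [f], b, c) by
        unfold fonSinifla; rw [if_pos h1], ih]
      simp [List.filter_cons, h1, List.append_assoc]
    | false =>
      cases h2 : PySem.Str.isIn t (dget f "kod") with
      | true =>
        rw [show fonSinifla t (a, b, c) f = (a, b ++ [f], c) by
          unfold fonSinifla
          rw [if_neg (by rw [h1]; exact Bool.false_ne_true), if_pos h2], ih]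
        have h2' := h2
        simp only [PySem.Str.isIn_eq] at h2'
        simp [List.filter_cons, h1, h2', List.append_assoc]
      | false =>
        cases h3 : PySem.Str.isIn t (pyUpper (dget f "isim")) with
        | true =>
          rw [show fonSinifla t (a, b, c) f = (a, b, c ++ [f]) by
            unfold fonSinifla
            rw [if_neg (by rw [h1]; exact Bool.false_ne_true), if_neg (by rw [h2]; exact Bool.false_ne_true), if_pos h3], ih]
          have h2' := h2; have h3' := h3
          simp only [PySem.Str.isIn_eq] at h2' h3'
          simp [List.filter_cons, h1, h2', h3', List.append_assoc]
        | false =>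
          rw [show fonSinifla t (a, b, c) f = (a, b, c) by
            unfold fonSinifla
            rw [if_neg (by rw [h1]; exact Bool.false_ne_true), if_neg (by rw [h2]; exact Bool.false_ne_true), if_neg (by rw [h3]; exact Bool.false_ne_true)], ih]
          have h2' := h2; have h3' := h3
          simp only [PySem.Str.isIn_eq] at h2' h3'
          simp [List.filter_cons, h1, h2', h3']

-- ===== VERDICT (by name: the statement is the Claim_ definition above) =====
theorem fon_ara_spec : Claim_equal_fon_ara := by
  intro terim _
  unfold Spec_fon_ara fon_ara fon_ara_alt
  rw [fon_ara_filters, foldB]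
  simp
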